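-- pv_equiv track=rewrite | github.com/sebpeck/reRoute_Dynamics | Supplimentary/Geography_Tools.py | repeat_id_remover
-- ===== SOURCE A (Python) =====
-- def repeat_id_remover(sequence):
--     '''
--     repeat_id_remover takes an iterable of IDs where -1 is invalid,
--     and swaps out any repeat index with an invalid.
--
--     Params:
--     sequence - a sequence of id values in an iterable.
--
--     Returns:
--     sequence with repeated values swapped for a -1.
--     '''
--
--     # start the sequence with invalid
--     sequence_value = -1
--
--     # build a list for the new sequence
--     new_sequence = []
--
--     # loop through the old
--     for item in sequence:
--
--         # check if the item is the same as the saved val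
--         if (item == sequence_value):
--
--             # if so, append invalid
--             new_sequence.append(-1)
--         else:
--
--             # otherwise, append the item and swap the saved val for the item
--             new_sequence.append(item)
--             sequence_value=item
--
--     # return the new sequence
--     return new_sequence
-- ===== SOURCE B (Python) =====
-- def repeat_id_remover(sequence):
--     seq = list(sequence)
--     out = []
--     n = len(seq)
--     i = 0
--     while i < n:
--         # find the end of the maximal run of equal values starting at i
--         j = i + 1
--         while j < n and seq[j] == seq[i]:
--             j += 1
--         # emit the run's value once, then -1 for each repeat in the run
--         out.append(seq[i])
--         out.extend([-1] * (j - i - 1))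
--         i = j
--     return out
-- ===== Notes on version B (the rewrite author's own statement) =====
-- stated objective: alternative
-- what changed: Run-length decomposition: instead of a single element-wise pass tracking the last distinct value, B scans the list as maximal runs of equal values and emits each run's value once followed by len(run)-1 sentinels.
import Mathlib
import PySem

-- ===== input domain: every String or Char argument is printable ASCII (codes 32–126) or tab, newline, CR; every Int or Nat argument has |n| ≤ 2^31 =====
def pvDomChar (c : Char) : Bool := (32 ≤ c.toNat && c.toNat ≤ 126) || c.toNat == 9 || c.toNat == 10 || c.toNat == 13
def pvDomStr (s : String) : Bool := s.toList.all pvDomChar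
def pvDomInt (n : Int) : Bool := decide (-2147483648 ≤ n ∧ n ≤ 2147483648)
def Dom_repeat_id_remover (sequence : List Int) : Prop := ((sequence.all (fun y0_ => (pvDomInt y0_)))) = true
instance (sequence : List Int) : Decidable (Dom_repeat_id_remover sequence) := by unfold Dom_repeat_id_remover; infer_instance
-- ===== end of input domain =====

-- B replaces A's element-wise pass with a last-distinct-value accumulator by a run-length
-- decomposition: each maximal run of equal values yields its value once and -1 for each repeat
-- (objective: alternative, same O(n) cost).

-- ===== PORT A =====
-- state = (sequence_value, new_sequence)
def repeat_id_remover (sequence : List Int) : List Int :=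
  (sequence.foldl
    (fun st item =>
      if item == st.1 then (st.1, st.2 ++ [(-1 : Int)])
      else (item, st.2 ++ [item]))
    ((-1 : Int), ([] : List Int))).2

-- ===== PORT B =====
-- inner while loop of B: length of the maximal prefix of xs equal to v (= j - i - 1)
def pvCountRun (v : Int) : List Int → Nat
  | [] => 0
  | x :: xs => if x == v then pvCountRun v xs + 1 else 0

-- outer while loop of B: one iteration per maximal run
def repeat_id_remover_alt (sequence : List Int) : List Int :=
  match sequence with
  | [] => []
  | x :: rest =>
      let k := pvCountRun x rest
      (x :: List.replicate k (-1)) ++ repeat_id_remover_alt (rest.drop k)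
termination_by sequence.length
decreasing_by
  simp only [List.length_cons, List.length_drop]
  omega

-- ===== PRECONDITION & SPEC =====
def Spec_repeat_id_remover (sequence : List Int) (out : List Int) : Prop := out = repeat_id_remover_alt sequence
instance (sequence : List Int) (out : List Int) : Decidable (Spec_repeat_id_remover sequence out) := by unfold Spec_repeat_id_remover; infer_instance

-- ===== CLAIM (what is proved, stated in full; the proofs are below) =====
def Claim_equal_repeat_id_remover : Prop := ∀ (sequence : List Int), Dom_repeat_id_remover sequence → Spec_repeat_id_remover sequence (repeat_id_remover sequence)

-- ===== LEMMAS AND PROOFS =====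

-- functional form of A's loop body, with the tracked value as explicit state
def pvGA (sv : Int) : List Int → List Int
  | [] => []
  | x :: xs => (if x == sv then (-1 : Int) else x) :: pvGA x xs

theorem repeat_id_remover_loop_eq (seq : List Int) : ∀ (sv : Int) (acc : List Int),
    (seq.foldl
      (fun st item =>
        if item == st.1 then (st.1, st.2 ++ [(-1 : Int)])
        else (item, st.2 ++ [item]))
      (sv, acc)).2
    = acc ++ pvGA sv seq := by
  induction seq with
  | nil => intro sv acc; simp [pvGA]
  | cons x xs ih =>
    intro sv acc
    rw [List.foldl_cons]
    by_cases hx : x = sv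
    · rw [if_pos (show (x == sv) = true by simp [hx]), ih]
      simp [pvGA, hx]
    · rw [if_neg (show ¬ (x == sv) = true by simp [hx]), ih]
      simp [pvGA, hx]

-- running A's tail with state x over a run of x's emits -1's, then continues past the run
theorem pvGA_run (x : Int) (xs : List Int) :
    pvGA x xs = List.replicate (pvCountRun x xs) (-1) ++ pvGA x (xs.drop (pvCountRun x xs)) := by
  induction xs with
  | nil => simp [pvCountRun, pvGA]
  | cons y ys ih =>
    by_cases hy : y = x
    · simp only [pvCountRun, pvGA, hy, beq_self_eq_true, if_pos, List.replicate_succ,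
        List.drop_succ_cons, List.cons_append]
      exact congrArg _ ih
    · simp [pvCountRun, pvGA, hy]

-- after the run, the head (if any) differs from x, so pvGA's state comparison cannot fire
theorem pvDrop_head_ne (x : Int) (xs : List Int) :
    ∀ y ys, xs.drop (pvCountRun x xs) = y :: ys → y ≠ x := by
  induction xs with
  | nil => intro y ys h; simp at h
  | cons z zs ih =>
    intro y ys h
    by_cases hz : z = x
    · simp only [pvCountRun, hz, beq_self_eq_true, if_pos, List.drop_succ_cons] at h
      exact ih y ys (by simpa [hz] using h)
    · simp only [pvCountRun, if_neg (show ¬ (z == x) = true by simp [hz]), List.drop_zero] at h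
      cases h; exact hz

-- main bridge: A's functional loop equals B's run recursion whenever the head can only
-- coincide with the tracked state if both are the sentinel -1 (then both emit -1 = head)
theorem pvGA_eq_alt : ∀ (seq : List Int) (sv : Int),
    (∀ y ys, seq = y :: ys → y = sv → y = -1) → pvGA sv seq = repeat_id_remover_alt seq := by
  intro seq
  induction seq using repeat_id_remover_alt.induct with
  | case1 => intro sv _; simp [pvGA, repeat_id_remover_alt]
  | case2 x rest k ih =>
    intro sv hne
    have hx : (if (x == sv) = true then (-1 : Int) else x) = x := by
      by_cases h : x = sv
      · simpa [h] using (hne x rest rfl h).symm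
      · simp [h]
    rw [repeat_id_remover_alt]
    simp only [pvGA, hx]
    rw [pvGA_run x rest]
    have : pvGA x (rest.drop (pvCountRun x rest)) = repeat_id_remover_alt (rest.drop (pvCountRun x rest)) := by
      exact ih x (fun y ys h hy => absurd hy (pvDrop_head_ne x rest y ys h))
    rw [this]
    simp

-- ===== VERDICT (by name: the statement is the Claim_ definition above) =====
theorem repeat_id_remover_spec : Claim_equal_repeat_id_remover := by
  intro seq _
  unfold Spec_repeat_id_remover repeat_id_remover
  rw [repeat_id_remover_loop_eq seq (-1) []]
  rw [pvGA_eq_alt seq (-1) (fun _ _ _ hy => hy)]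
  simp
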